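-- pv_equiv track=rewrite | github.com/Sachintha-Lakruwan/RPAL-Compiler | CSE_Machine/cseMachine.py | parse_tuple
-- ===== SOURCE A (Python) =====
-- def parse_tuple(tuple_str):
--
--     if not (tuple_str.startswith('(') and tuple_str.endswith(')')):
--         return [tuple_str]
--
--     # Remove outer parentheses
--     content = tuple_str[1:-1].strip()
--     if not content:
--         return []
--
--     elements = []
--     current_element = ""
--     bracket_count = 0
--     brace_count = 0
--     paren_count = 0
--     in_quotes = False
--     quote_char = None
--
--     i = 0
--     while i < len(content):
--         char = content[i]
--
--         # Handle quotes
--         if char in ['"', "'"]: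
--             if not in_quotes:
--                 in_quotes = True
--                 quote_char = char
--             elif char == quote_char:
--                 # Check if it's escaped
--                 if i > 0 and content[i-1] != '\\':
--                     in_quotes = False
--                     quote_char = None
--
--         # If we're inside quotes, just add the character
--         if in_quotes:
--             current_element += char
--         else:
--             # Track nested structures
--             if char == '[':
--                 bracket_count += 1
--             elif char == ']':
--                 bracket_count -= 1
--             elif char == '{':
--                 brace_count += 1
--             elif char == '}':
--                 brace_count -= 1
--             elif char == '(':
--                 paren_count += 1
--             elif char == ')':
--                 paren_count -= 1
--             elif char == ',' and bracket_count == 0 and brace_count == 0 and paren_count == 0: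
--                 # This is a top-level comma separator
--                 elements.append(current_element.strip())
--                 current_element = ""
--                 i += 1
--                 continue
--
--             current_element += char
--
--         i += 1
--
--     # Add the last element
--     if current_element.strip():
--         elements.append(current_element.strip())
--
--     return elements
-- ===== SOURCE B (Python) =====
-- def parse_tuple(tuple_str):
--     if not (tuple_str.startswith('(') and tuple_str.endswith(')')):
--         return [tuple_str]
--
--     content = tuple_str[1:-1].strip()
--     if not content:
--         return []
--
--     # Pass 1: record cut points (position before content, each top-level comma, position past content),
--     # tracking nesting with a table-indexed vector of three depth counters.
--     opens = {'[': 0, '{': 1, '(': 2}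
--     closes = {']': 0, '}': 1, ')': 2}
--     depth = [0, 0, 0]
--     in_quotes = False
--     quote_char = None
--     cuts = [-1]
--     for i, ch in enumerate(content):
--         if ch in ('"', "'"):
--             if not in_quotes:
--                 in_quotes, quote_char = True, ch
--             elif ch == quote_char and i > 0 and content[i - 1] != '\\':
--                 in_quotes, quote_char = False, None
--         if in_quotes:
--             continue
--         if ch in opens:
--             depth[opens[ch]] += 1
--         elif ch in closes:
--             depth[closes[ch]] -= 1
--         elif ch == ',' and depth == [0, 0, 0]:
--             cuts.append(i)
--     cuts.append(len(content))
--
--     # Pass 2: the elements are the stripped slices between consecutive cut points;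
--     # drop the final one when it strips to nothing.
--     segs = [content[cuts[j] + 1:cuts[j + 1]].strip() for j in range(len(cuts) - 1)]
--     if not segs[-1]:
--         segs.pop()
--     return segs
-- ===== Notes on version B (the rewrite author's own statement) =====
-- stated objective: alternative
-- what changed: Replaced A's single accumulating scan (three named bracket counters, element grown character by character) with a table-driven pass that records cut points using a dict from bracket char to a slot in a depth vector, followed by a slicing comprehension over consecutive cut points.
import Mathlib
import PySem

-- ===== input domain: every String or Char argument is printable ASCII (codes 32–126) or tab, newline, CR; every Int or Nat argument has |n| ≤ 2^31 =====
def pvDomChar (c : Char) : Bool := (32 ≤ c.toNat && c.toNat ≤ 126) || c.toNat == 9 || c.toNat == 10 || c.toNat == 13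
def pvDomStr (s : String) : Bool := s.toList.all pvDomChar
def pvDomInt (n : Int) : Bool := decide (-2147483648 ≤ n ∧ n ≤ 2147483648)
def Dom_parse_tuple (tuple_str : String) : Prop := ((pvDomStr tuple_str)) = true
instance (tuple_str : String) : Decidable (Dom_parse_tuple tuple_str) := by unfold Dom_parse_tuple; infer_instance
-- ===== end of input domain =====

-- B replaces A's single accumulating scan (three named counters, element grown char by char) by a
-- table-driven cut-point recording pass (a dict from bracket char to a slot in a depth vector) plus a
-- slicing comprehension over consecutive cut points (alternative decomposition, same behaviour).

-- ===== PORT A =====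
-- A's quote-handling block (nested ifs, as in A's Python);
-- `content[i-1]` is ported as getD (guarded by 0 < i, so in range and exact).
def pvA_quote (content : List Char) (i : Nat) (c : Char) (inQ : Bool) (qc : Option Char) : Bool × Option Char :=
  if c = '"' ∨ c = '\'' then
    if inQ = false then (true, some c)
    else if some c = qc then
      (if 0 < i ∧ content.getD (i-1) ' ' ≠ '\\' then (false, none) else (inQ, qc))
    else (inQ, qc)
  else (inQ, qc)

-- A's while loop as structural recursion on the not-yet-scanned suffix `rest` (= content.drop i)
def pvA_go (content : List Char) (rest : List Char) (i : Nat) (elements : List String) (current : List Char)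
    (bc brc pc : Int) (inQ : Bool) (qc : Option Char) : List String :=
  match rest with
  | [] =>
    if PySem.Chars.strip current ≠ [] then elements ++ [String.ofList (PySem.Chars.strip current)]
    else elements
  | c :: rs =>
    let st := pvA_quote content i c inQ qc
    if st.1 then
      pvA_go content rs (i+1) elements (current ++ [c]) bc brc pc st.1 st.2
    else if c = '[' then pvA_go content rs (i+1) elements (current ++ [c]) (bc+1) brc pc st.1 st.2
    else if c = ']' then pvA_go content rs (i+1) elements (current ++ [c]) (bc-1) brc pc st.1 st.2
    else if c = '{' then pvA_go content rs (i+1) elements (current ++ [c]) bc (brc+1) pc st.1 st.2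
    else if c = '}' then pvA_go content rs (i+1) elements (current ++ [c]) bc (brc-1) pc st.1 st.2
    else if c = '(' then pvA_go content rs (i+1) elements (current ++ [c]) bc brc (pc+1) st.1 st.2
    else if c = ')' then pvA_go content rs (i+1) elements (current ++ [c]) bc brc (pc-1) st.1 st.2
    else if c = ',' ∧ bc = 0 ∧ brc = 0 ∧ pc = 0 then
      pvA_go content rs (i+1) (elements ++ [String.ofList (PySem.Chars.strip current)]) [] bc brc pc st.1 st.2
    else pvA_go content rs (i+1) elements (current ++ [c]) bc brc pc st.1 st.2

def parse_tuple (tuple_str : String) : List String :=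
  if ¬ (PySem.Str.startswith tuple_str "(" && PySem.Str.endswith tuple_str ")") then [tuple_str]
  else
    let content := PySem.Chars.strip (PySem.List.slice tuple_str.toList (some 1) (some (-1)))
    if content = [] then []
    else pvA_go content content 0 [] [] 0 0 0 false none

-- ===== PORT B =====
-- the two lookup tables of Source B: bracket char → slot in the depth vector
def pvB_opens : PySem.Dict Char Int := PySem.Dict.ofList [('[', 0), ('{', 1), ('(', 2)]
def pvB_closes : PySem.Dict Char Int := PySem.Dict.ofList [(']', 0), ('}', 1), (')', 2)]

-- Source B's inline quote-state update (the `if ch in ('"', "'")` block); `content[i-1]`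
-- is ported as getD at (i-1).toNat, exact under the 0 < i guard
def pvB_quoteStep (content : List Char) (i : Int) (ch : Char) (inQ : Bool) (qc : Option Char) : Bool × Option Char :=
  if ch = '"' ∨ ch = '\'' then
    if inQ = false then (true, some ch)
    else if some ch = qc ∧ 0 < i ∧ content.getD (i - 1).toNat ' ' ≠ '\\' then (false, none)
    else (inQ, qc)
  else (inQ, qc)

-- the body of Source B's `for i, ch in enumerate(content)` loop; state = (depth vector, in_quotes, quote_char, cuts).
-- `depth[opens[ch]] += 1` is ported as List.set/getD: the table values 0/1/2 are in range, so this is exact.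
def pvB_step (content : List Char) (st : List Int × Bool × Option Char × List Int) (ic : Int × Char) :
    List Int × Bool × Option Char × List Int :=
  let q := pvB_quoteStep content ic.1 ic.2 st.2.1 st.2.2.1
  if q.1 then (st.1, q.1, q.2, st.2.2.2)
  else
    match pvB_opens.get? ic.2 with
    | some k => (st.1.set k.toNat (st.1.getD k.toNat 0 + 1), q.1, q.2, st.2.2.2)
    | none =>
      match pvB_closes.get? ic.2 with
      | some k => (st.1.set k.toNat (st.1.getD k.toNat 0 - 1), q.1, q.2, st.2.2.2)
      | none =>
        if ic.2 = ',' ∧ st.1 = [0, 0, 0] then (st.1, q.1, q.2, st.2.2.2 ++ [ic.1])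
        else (st.1, q.1, q.2, st.2.2.2)

-- one element of Source B's slicing comprehension: content[cuts[j]+1 : cuts[j+1]].strip()
-- (cuts[j] read with getD: j ranges over range(len(cuts)-1), in range, so exact)
def pvB_seg (content : List Char) (cuts : List Int) (j : Nat) : List Char :=
  PySem.Chars.strip (PySem.List.slice content (some (cuts.getD j 0 + 1)) (some (cuts.getD (j+1) 0)))

def parse_tuple_alt (tuple_str : String) : List String :=
  if ¬ (PySem.Str.startswith tuple_str "(" && PySem.Str.endswith tuple_str ")") then [tuple_str]
  else
    let content := PySem.Chars.strip (PySem.List.slice tuple_str.toList (some 1) (some (-1)))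
    if content = [] then []
    else
      let cuts := ((PySem.List.enumerate content 0).foldl (pvB_step content) ([0, 0, 0], false, none, [-1])).2.2.2
                    ++ [(content.length : Int)]
      let segs := (List.range (cuts.length - 1)).map (fun j => String.ofList (pvB_seg content cuts j))
      if segs.getLast? = some "" then segs.dropLast else segs

-- ===== PRECONDITION & SPEC =====
def Spec_parse_tuple (tuple_str : String) (out : List String) : Prop := out = parse_tuple_alt tuple_str
instance (tuple_str : String) (out : List String) : Decidable (Spec_parse_tuple tuple_str out) := by unfold Spec_parse_tuple; infer_instance

-- ===== CLAIM (what is proved, stated in full; the proofs are below) =====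
def Claim_equal_parse_tuple : Prop := ∀ (tuple_str : String), Dom_parse_tuple tuple_str → Spec_parse_tuple tuple_str (parse_tuple tuple_str)

-- ===== LEMMAS AND PROOFS =====

-- Proof-side bridge: the comma positions as a plain Nat list (pvC_commas) and A's output rebuilt
-- from them (pvC_build); A is proved equal to the bridge, and B's scan/slicing passes to the bridge too.
def pvC_quote (content : List Char) (i : Nat) (c : Char) (inQ : Bool) (qc : Option Char) : Bool × Option Char :=
  if c = '"' ∨ c = '\'' then
    if inQ = false then (true, some c)
    else if some c = qc ∧ 0 < i ∧ content.getD (i-1) ' ' ≠ '\\' then (false, none)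
    else (inQ, qc)
  else (inQ, qc)

def pvC_commas (content : List Char) (rest : List Char) (i : Nat) (commas : List Nat)
    (bc brc pc : Int) (inQ : Bool) (qc : Option Char) : List Nat :=
  match rest with
  | [] => commas
  | c :: rs =>
    let st := pvC_quote content i c inQ qc
    if st.1 then pvC_commas content rs (i+1) commas bc brc pc st.1 st.2
    else if c = '[' then pvC_commas content rs (i+1) commas (bc+1) brc pc st.1 st.2
    else if c = ']' then pvC_commas content rs (i+1) commas (bc-1) brc pc st.1 st.2
    else if c = '{' then pvC_commas content rs (i+1) commas bc (brc+1) pc st.1 st.2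
    else if c = '}' then pvC_commas content rs (i+1) commas bc (brc-1) pc st.1 st.2
    else if c = '(' then pvC_commas content rs (i+1) commas bc brc (pc+1) st.1 st.2
    else if c = ')' then pvC_commas content rs (i+1) commas bc brc (pc-1) st.1 st.2
    else if c = ',' ∧ bc = 0 ∧ brc = 0 ∧ pc = 0 then
      pvC_commas content rs (i+1) (commas ++ [i]) bc brc pc st.1 st.2
    else pvC_commas content rs (i+1) commas bc brc pc st.1 st.2

def pvC_build (content : List Char) (commas : List Nat) (start : Nat) (elements : List String) : List String :=
  match commas with
  | [] =>
    let last := PySem.Chars.strip (PySem.List.slice content (some (start : Int)) none)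
    if last ≠ [] then elements ++ [String.ofList last] else elements
  | k :: rest =>
    pvC_build content rest (k+1)
      (elements ++ [String.ofList (PySem.Chars.strip (PySem.List.slice content (some (start : Int)) (some (k : Int))))])

-- the quote-state update of A (nested ifs) and of the bridge (∧-chain) agree
theorem pv_quote_eq (content : List Char) (i : Nat) (c : Char) (inQ : Bool) (qc : Option Char) :
    pvC_quote content i c inQ qc = pvA_quote content i c inQ qc := by
  unfold pvA_quote pvC_quote
  split_ifs <;> simp_all

-- the bridge scan is an accumulator loop
set_option maxHeartbeats 1600000 in
theorem pvC_commas_acc (content : List Char) (rest : List Char) (i : Nat) (commas : List Nat)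
    (bc brc pc : Int) (inQ : Bool) (qc : Option Char) :
    pvC_commas content rest i commas bc brc pc inQ qc
      = commas ++ pvC_commas content rest i [] bc brc pc inQ qc := by
  induction rest generalizing i commas bc brc pc inQ qc with
  | nil => simp [pvC_commas]
  | cons c rs ih =>
    simp only [pvC_commas]
    split_ifs <;>
      first
      | exact ih ..
      | (rw [ih (i+1) (commas ++ [i]), ih (i+1) ([] ++ [i])]
         simp [List.append_assoc])

-- the main invariant on the A side: A's scan from position i equals the bridge rebuild over the commas
-- found from i, given that `current` is exactly the slice content[start:i]
set_option maxHeartbeats 1600000 in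
theorem pv_main (content : List Char) (rest : List Char) (i start : Nat) (elements : List String)
    (current : List Char) (bc brc pc : Int) (inQ : Bool) (qc : Option Char)
    (hdrop : content.drop i = rest) (hs : start ≤ i)
    (hcur : current = (content.drop start).take (i - start)) :
    pvA_go content rest i elements current bc brc pc inQ qc
      = pvC_build content (pvC_commas content rest i [] bc brc pc inQ qc) start elements := by
  induction rest generalizing i start elements current bc brc pc inQ qc with
  | nil =>
    have hlen : content.length ≤ i := List.drop_eq_nil_iff.mp hdrop
    have hfull : current = content.drop start := by
      rw [hcur]
      exact List.take_of_length_le (by simp; omega)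
    simp only [pvA_go, pvC_commas, pvC_build, PySem.List.slice_from_natCast, hfull]
  | cons c rs ih =>
    have hi : i < content.length := by
      by_contra hlt
      rw [List.drop_eq_nil_iff.mpr (by omega)] at hdrop
      exact (List.cons_ne_nil c rs) hdrop.symm
    have hgetc : content[i]? = some c := by
      have h0 : (content.drop i)[0]? = some c := by rw [hdrop]; rfl
      rwa [List.getElem?_drop, Nat.add_zero] at h0
    have hdrop' : content.drop (i+1) = rs := by
      rw [← List.tail_drop, hdrop]; rfl
    have hcur' : current ++ [c] = (content.drop start).take (i + 1 - start) := by
      have : i + 1 - start = (i - start) + 1 := by omega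
      rw [this, List.take_add_one, hcur, List.getElem?_drop]
      have : start + (i - start) = i := by omega
      rw [this, hgetc]; rfl
    have hslice : PySem.List.slice content (some (start : Int)) (some (i : Int)) = current := by
      rw [PySem.List.slice_natCast, hcur]
    simp only [pvA_go, pvC_commas, pv_quote_eq]
    split_ifs with h1 h2 h3 h4 h5 h6 h7 h8
    · exact ih (i+1) start elements (current ++ [c]) _ _ _ _ _ hdrop' (by omega) hcur'
    · exact ih (i+1) start elements (current ++ [c]) _ _ _ _ _ hdrop' (by omega) hcur'
    · exact ih (i+1) start elements (current ++ [c]) _ _ _ _ _ hdrop' (by omega) hcur'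
    · exact ih (i+1) start elements (current ++ [c]) _ _ _ _ _ hdrop' (by omega) hcur'
    · exact ih (i+1) start elements (current ++ [c]) _ _ _ _ _ hdrop' (by omega) hcur'
    · exact ih (i+1) start elements (current ++ [c]) _ _ _ _ _ hdrop' (by omega) hcur'
    · exact ih (i+1) start elements (current ++ [c]) _ _ _ _ _ hdrop' (by omega) hcur'
    · -- top-level comma
      rw [pvC_commas_acc content rs (i+1) ([] ++ [i]), List.nil_append]
      rw [ih (i+1) (i+1) (elements ++ [String.ofList (PySem.Chars.strip current)]) [] _ _ _ _ _
            hdrop' le_rfl (by simp)]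
      simp only [List.cons_append, List.nil_append]
      conv_rhs => rw [pvC_build]
      rw [hslice]
    · exact ih (i+1) start elements (current ++ [c]) _ _ _ _ _ hdrop' (by omega) hcur'

-- B side: the table lookups, written out
theorem pv_opens_none (ch : Char) (h1 : ch ≠ '[') (h2 : ch ≠ '{') (h3 : ch ≠ '(') :
    pvB_opens.get? ch = none := by
  have hd : pvB_opens = PySem.Dict.mk [('[', 0), ('{', 1), ('(', 2)] := by rfl
  rw [hd]
  simp [PySem.Dict.get?, Ne.symm h1, Ne.symm h2, Ne.symm h3]

theorem pv_closes_none (ch : Char) (h1 : ch ≠ ']') (h2 : ch ≠ '}') (h3 : ch ≠ ')') :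
    pvB_closes.get? ch = none := by
  have hd : pvB_closes = PySem.Dict.mk [(']', 0), ('}', 1), (')', 2)] := by rfl
  rw [hd]
  simp [PySem.Dict.get?, Ne.symm h1, Ne.symm h2, Ne.symm h3]

-- B's inline quote update at the cast index equals the bridge's
theorem pv_quoteB_eq (content : List Char) (i : Nat) (c : Char) (inQ : Bool) (qc : Option Char) :
    pvB_quoteStep content (i : Int) c inQ qc = pvC_quote content i c inQ qc := by
  unfold pvB_quoteStep pvC_quote
  simp only [show ((i : Int) - 1).toNat = i - 1 from by omega, Int.natCast_pos]

-- pvB_step on a concrete state, written out as the bridge's branch list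
set_option maxHeartbeats 1600000 in
theorem pvB_step_char (content : List Char) (i : Nat) (c : Char) (bc brc pc : Int)
    (inQ : Bool) (qc : Option Char) (cuts : List Int) :
    pvB_step content ([bc, brc, pc], inQ, qc, cuts) ((i : Int), c)
      = (let st := pvC_quote content i c inQ qc;
         if st.1 then ([bc, brc, pc], st.1, st.2, cuts)
         else if c = '[' then ([bc+1, brc, pc], st.1, st.2, cuts)
         else if c = ']' then ([bc-1, brc, pc], st.1, st.2, cuts)
         else if c = '{' then ([bc, brc+1, pc], st.1, st.2, cuts)
         else if c = '}' then ([bc, brc-1, pc], st.1, st.2, cuts)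
         else if c = '(' then ([bc, brc, pc+1], st.1, st.2, cuts)
         else if c = ')' then ([bc, brc, pc-1], st.1, st.2, cuts)
         else if c = ',' ∧ bc = 0 ∧ brc = 0 ∧ pc = 0 then ([bc, brc, pc], st.1, st.2, cuts ++ [(i : Int)])
         else ([bc, brc, pc], st.1, st.2, cuts)) := by
  unfold pvB_step
  rw [pv_quoteB_eq]
  by_cases hQ : (pvC_quote content i c inQ qc).1 = true
  · simp [hQ]
  · by_cases h1 : c = '['
    · subst h1
      simp [hQ, show pvB_opens.get? '[' = some 0 from by decide, List.getD]
    · by_cases h2 : c = ']'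
      · subst h2
        simp [hQ, show pvB_opens.get? ']' = none from by decide,
          show pvB_closes.get? ']' = some 0 from by decide, List.getD]
      · by_cases h3 : c = '{'
        · subst h3
          simp [hQ, show pvB_opens.get? '{' = some 1 from by decide, List.getD]
        · by_cases h4 : c = '}'
          · subst h4
            simp [hQ, show pvB_opens.get? '}' = none from by decide,
              show pvB_closes.get? '}' = some 1 from by decide, List.getD]
          · by_cases h5 : c = '('
            · subst h5
              simp [hQ, show pvB_opens.get? '(' = some 2 from by decide, List.getD]
            · by_cases h6 : c = ')'
              · subst h6
                simp [hQ, show pvB_opens.get? ')' = none from by decide,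
                  show pvB_closes.get? ')' = some 2 from by decide, List.getD]
              · rw [pv_opens_none c h1 h3 h5, pv_closes_none c h2 h4 h6]
                simp [hQ, h1, h2, h3, h4, h5, h6]

-- B's pass 1 collects exactly the bridge's comma positions (cast to Int), appended to cuts
set_option maxHeartbeats 1600000 in
theorem pvB_scan_eq (content : List Char) (rest : List Char) (i : Nat) (bc brc pc : Int)
    (inQ : Bool) (qc : Option Char) (cuts : List Int) :
    ((PySem.List.enumerate rest (i : Int)).foldl (pvB_step content) ([bc, brc, pc], inQ, qc, cuts)).2.2.2
      = cuts ++ (pvC_commas content rest i [] bc brc pc inQ qc).map (fun k : Nat => (k : Int)) := by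
  induction rest generalizing i bc brc pc inQ qc cuts with
  | nil => simp [PySem.List.enumerate_nil, pvC_commas]
  | cons c rs ih =>
    rw [PySem.List.enumerate_cons, List.foldl_cons, pvB_step_char,
        show (i : Int) + 1 = ((i + 1 : Nat) : Int) from by push_cast; ring]
    simp only [pvC_commas]
    split_ifs with h1 h2 h3 h4 h5 h6 h7 h8
    · exact ih ..
    · exact ih ..
    · exact ih ..
    · exact ih ..
    · exact ih ..
    · exact ih ..
    · exact ih ..
    · -- top-level comma
      rw [ih (i+1) bc brc pc _ _ (cuts ++ [(i : Int)]),
          pvC_commas_acc content rs (i+1) ([] ++ [i])]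
      simp [List.append_assoc]
    · exact ih ..

-- shifting the slicing comprehension by one cut point
theorem pvB_seg_cons (content : List Char) (a : Int) (l : List Int) (j : Nat) :
    pvB_seg content (a :: l) (j+1) = pvB_seg content l j := by
  simp [pvB_seg]

-- the whole slicing comprehension of Source B, as a function of the cut-point list
def pvSegs (content : List Char) (cuts : List Int) : List String :=
  (List.range (cuts.length - 1)).map (fun j => String.ofList (pvB_seg content cuts j))

theorem pvSegs_cons (content : List Char) (a b : Int) (l : List Int) :
    pvSegs content (a :: b :: l)
      = String.ofList (pvB_seg content (a :: b :: l) 0) :: pvSegs content (b :: l) := by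
  simp only [pvSegs, List.length_cons, Nat.add_sub_cancel, List.range_succ_eq_map,
    List.map_cons, List.map_map]
  refine congrArg (String.ofList (pvB_seg content (a :: b :: l) 0) :: ·) ?_
  apply List.map_congr_left
  intro j _
  simp only [Function.comp]
  rw [pvB_seg_cons]

theorem pvSegs_ne_nil (content : List Char) (b : Int) (l : List Int) (h : l ≠ []) :
    pvSegs content (b :: l) ≠ [] := by
  have hl : 0 < l.length := List.length_pos_of_ne_nil h
  simp only [pvSegs, ne_eq, List.map_eq_nil_iff, List.range_eq_nil, List.length_cons]
  omega

theorem pv_ofList_eq_empty (l : List Char) : String.ofList l = "" ↔ l = [] := by simp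

theorem pv_getLast?_cons {α : Type} (x : α) (l : List α) (h : l ≠ []) :
    (x :: l).getLast? = l.getLast? := by
  cases l with
  | nil => exact absurd rfl h
  | cons y ys => simp [List.getLast?_cons_cons]

theorem pv_dropLast_cons {α : Type} (x : α) (l : List α) (h : l ≠ []) :
    (x :: l).dropLast = x :: l.dropLast := List.dropLast_cons_of_ne_nil h

-- B's pass 2 over the cut points rebuilds exactly the bridge's output
set_option maxHeartbeats 1600000 in
theorem pvB_build_eq (content : List Char) (commas : List Nat) (start : Nat) (elements : List String) :
    pvC_build content commas start elements
      = (if (pvSegs content (((start : Int) - 1) :: (commas.map (fun k : Nat => (k : Int)) ++ [(content.length : Int)]))).getLast? = some ""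
         then elements ++ (pvSegs content (((start : Int) - 1) :: (commas.map (fun k : Nat => (k : Int)) ++ [(content.length : Int)]))).dropLast
         else elements ++ pvSegs content (((start : Int) - 1) :: (commas.map (fun k : Nat => (k : Int)) ++ [(content.length : Int)]))) := by
  induction commas generalizing start elements with
  | nil =>
    have hseg : pvB_seg content [(start : Int) - 1, (content.length : Int)] 0
        = PySem.Chars.strip (content.drop start) := by
      simp only [pvB_seg, List.getD_cons_zero, List.getD_cons_succ]
      rw [show (start : Int) - 1 + 1 = (start : Int) from by ring, PySem.List.slice_natCast,
          List.take_of_length_le (by simp)]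
    have hsegs : pvSegs content [(start : Int) - 1, (content.length : Int)]
        = [String.ofList (PySem.Chars.strip (content.drop start))] := by
      simp [pvSegs, List.range_one, hseg]
    simp only [pvC_build, List.map_nil, List.nil_append, hsegs, PySem.List.slice_from_natCast]
    by_cases ht : PySem.Chars.strip (content.drop start) = []
    · simp [ht]
    · have hx : String.ofList (PySem.Chars.strip (content.drop start)) ≠ "" := by
        simpa [pv_ofList_eq_empty] using ht
      simp [ht, hx]
  | cons k ks ih =>
    have hcast : ((k + 1 : Nat) : Int) - 1 = (k : Int) := by push_cast; ring
    have hne : pvSegs content ((k : Int) :: (ks.map (fun k : Nat => (k : Int)) ++ [(content.length : Int)])) ≠ [] :=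
      pvSegs_ne_nil content _ _ (by simp)
    have hseg0 : pvB_seg content (((start : Int) - 1) :: (k : Int) :: (ks.map (fun k : Nat => (k : Int)) ++ [(content.length : Int)])) 0
        = PySem.Chars.strip (PySem.List.slice content (some (start : Int)) (some (k : Int))) := by
      simp only [pvB_seg, List.getD_cons_zero, List.getD_cons_succ]
      rw [show (start : Int) - 1 + 1 = (start : Int) from by ring]
    rw [pvC_build, ih (k+1), hcast]
    simp only [List.map_cons, List.cons_append, pvSegs_cons, hseg0]
    rw [pv_getLast?_cons _ _ hne, pv_dropLast_cons _ _ hne]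
    split_ifs <;> simp

-- ===== VERDICT (by name: the statement is the Claim_ definition above) =====
set_option maxHeartbeats 1600000 in
theorem parse_tuple_spec : Claim_equal_parse_tuple := by
  intro s _
  unfold Spec_parse_tuple parse_tuple parse_tuple_alt
  split
  · rfl
  · show (if _ = ([] : List Char) then _ else _) = (if _ = ([] : List Char) then _ else _)
    split
    · rfl
    · rw [pv_main _ _ 0 0 [] [] 0 0 0 false none (by simp) le_rfl (by simp),
          pvB_build_eq]
      have hscan := pvB_scan_eq (PySem.Chars.strip (PySem.List.slice s.toList (some 1) (some (-1))))
        (PySem.Chars.strip (PySem.List.slice s.toList (some 1) (some (-1)))) 0 0 0 0 false none [-1]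
      push_cast at hscan
      simp only [hscan, Nat.cast_zero, zero_sub, pvSegs]
      norm_num
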